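-- pv_equiv track=rewrite | github.com/danipishinin/HackerRank | artificial_intelligence/bot-saves-princess2.py | nextMove
-- ===== SOURCE A (Python) =====
-- def nextMove(n,r,c,grid):
--     princess = [0,0]
--     # Finding Princess
--     for i in range(n):
--         for j in range(n):
--             if(grid[i][j] == 'p'):
--                 princess = [i,j]
--
--     # Moves to saves princess
--     if(r < princess[0]):
--         return 'DOWN'
--     elif(r > princess[0]):
--         return 'UP'
--     elif(c < princess[1]):
--         return 'RIGHT'
--     elif(c > princess[1]):
--         return 'LEFT'
-- ===== SOURCE B (Python) =====
-- def nextMove(n, r, c, grid):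
--     # Scan rows bottom-up and stop at the first row containing 'p' (its last
--     # occurrence within the first n columns), instead of overwriting through a
--     # full nested cell scan; direction decided by two two-way branches.
--     pr, pc = 0, 0
--     for i in reversed(range(n)):
--         j = grid[i][:n].rfind('p')
--         if j >= 0:
--             pr, pc = i, j
--             break
--     if r != pr:
--         return 'DOWN' if r < pr else 'UP'
--     if c != pc:
--         return 'RIGHT' if c < pc else 'LEFT'
-- ===== Notes on version B (the rewrite author's own statement) =====
-- stated objective: alternative
-- what changed: The full nested cell-by-cell scan with overwrite is replaced by a bottom-up scan over rows that stops at the first row containing 'p' (taking its last occurrence via rfind on the row's first n columns), and the 4-way direction cascade becomes two two-way branches.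
import Mathlib
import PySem

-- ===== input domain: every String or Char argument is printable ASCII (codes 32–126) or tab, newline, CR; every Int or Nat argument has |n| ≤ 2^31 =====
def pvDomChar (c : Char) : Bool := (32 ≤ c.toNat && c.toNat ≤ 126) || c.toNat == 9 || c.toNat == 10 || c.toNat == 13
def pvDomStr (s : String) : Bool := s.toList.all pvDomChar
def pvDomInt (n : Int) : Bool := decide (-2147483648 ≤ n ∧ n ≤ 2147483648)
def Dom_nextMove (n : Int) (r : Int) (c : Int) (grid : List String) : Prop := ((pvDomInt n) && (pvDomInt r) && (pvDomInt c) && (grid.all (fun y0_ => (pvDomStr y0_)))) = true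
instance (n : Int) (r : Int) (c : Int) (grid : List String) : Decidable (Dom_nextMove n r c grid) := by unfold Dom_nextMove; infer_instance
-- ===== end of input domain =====

-- B scans rows bottom-up and stops at the first row containing 'p' (rfind on the row), instead of A's full nested overwrite scan (alternative decomposition, same worst-case cost).

-- ===== PORT A =====
def nextMove (n : Int) (r : Int) (c : Int) (grid : List String) : Option String :=
  let princess : Int × Int :=
    (PySem.List.pyRange 0 n 1).foldl (fun pr i =>
      (PySem.List.pyRange 0 n 1).foldl (fun pr j =>
        if PySem.Str.pyGet? (PySem.List.pyGetD grid i "") j = some 'p' then (i, j) else pr) pr)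
      (0, 0)
  if r < princess.1 then some "DOWN"
  else if princess.1 < r then some "UP"
  else if c < princess.2 then some "RIGHT"
  else if princess.2 < c then some "LEFT"
  else none

-- ===== PORT B =====
-- the 'for i in reversed(range(n)): … break' loop of Source B, as structural recursion on the index list
def pvRowScan (grid : List String) (n : Int) : List Int → Int × Int
  | [] => (0, 0)
  | i :: rest =>
    let j := PySem.Str.rfind (PySem.Str.slice (PySem.List.pyGetD grid i "") none (some n)) "p"
    if 0 ≤ j then (i, j) else pvRowScan grid n rest

def nextMove_alt (n : Int) (r : Int) (c : Int) (grid : List String) : Option String :=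
  let p := pvRowScan grid n ((PySem.List.pyRange 0 n 1).reverse)
  if r ≠ p.1 then (if r < p.1 then some "DOWN" else some "UP")
  else if c ≠ p.2 then (if c < p.2 then some "RIGHT" else some "LEFT")
  else none

-- ===== PRECONDITION & SPEC =====
-- Pre_ excludes exactly the inputs on which A raises IndexError: a grid with fewer than n rows,
-- or one of the first n rows shorter than n.
def Pre_nextMove (n : Int) (r : Int) (c : Int) (grid : List String) : Prop :=
  n ≤ (grid.length : Int) ∧ ∀ s ∈ grid.take n.toNat, n ≤ (s.toList.length : Int)
instance (n : Int) (r : Int) (c : Int) (grid : List String) : Decidable (Pre_nextMove n r c grid) := by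
  unfold Pre_nextMove; infer_instance
def pvWitness_nextMove : Int × Int × Int × List String := (2, 0, 0, ["x.", ".p"])

def Spec_nextMove (n : Int) (r : Int) (c : Int) (grid : List String) (out : Option String) : Prop := out = nextMove_alt n r c grid
instance (n : Int) (r : Int) (c : Int) (grid : List String) (out : Option String) : Decidable (Spec_nextMove n r c grid out) := by unfold Spec_nextMove; infer_instance

-- ===== CLAIM (what is proved, stated in full; the proofs are below) =====
def Claim_equal_nextMove : Prop := ∀ (n : Int) (r : Int) (c : Int) (grid : List String), Dom_nextMove n r c grid → Pre_nextMove n r c grid → Spec_nextMove n r c grid (nextMove n r c grid)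

-- ===== LEMMAS AND PROOFS =====

-- last index of ch in cs, -1 if absent (proof-only characterisation of rfind on a single char)
def lastIdx (ch : Char) : List Char → Int
  | [] => -1
  | c :: t => if lastIdx ch t = -1 then (if c = ch then 0 else -1) else lastIdx ch t + 1

theorem neg_one_le_lastIdx (ch : Char) (cs : List Char) : -1 ≤ lastIdx ch cs := by
  induction cs with
  | nil => simp [lastIdx]
  | cons c t ih => simp only [lastIdx]; split_ifs <;> omega

theorem lastIdx_append (ch : Char) (s t : List Char) :
    lastIdx ch (s ++ t) = if lastIdx ch t = -1 then lastIdx ch s else (s.length : Int) + lastIdx ch t := by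
  induction s with
  | nil =>
    simp only [List.nil_append, List.length_nil, Nat.cast_zero, zero_add]
    split_ifs with h
    · simp [lastIdx, h]
    · rfl
  | cons c s ih =>
    simp only [List.cons_append, lastIdx, ih, List.length_cons]
    have h1 := neg_one_le_lastIdx ch t
    have h2 := neg_one_le_lastIdx ch s
    split_ifs <;> push_cast <;> omega

theorem isPrefixOf_singleton (ch : Char) (xs : List Char) :
    [ch].isPrefixOf xs = (xs[0]? == some ch) := by
  cases xs with
  | nil => simp [List.isPrefixOf]
  | cons y t => simp [List.isPrefixOf, BEq.comm]

theorem lastIdx_singleton (ch y : Char) :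
    lastIdx ch [y] = if y = ch then 0 else -1 := by
  simp [lastIdx]

theorem rfind_go_singleton (ch : Char) (cs : List Char) (k : Nat) :
    PySem.Chars.rfind.go cs [ch] k = lastIdx ch (cs.take (k + 1)) := by
  induction k with
  | zero =>
    cases cs with
    | nil => simp [PySem.Chars.rfind.go, lastIdx]
    | cons y t =>
      simp only [PySem.Chars.rfind.go, isPrefixOf_singleton, List.take_succ_cons,
        List.take_zero, lastIdx_singleton]
      by_cases hy : y = ch <;> simp [hy]
  | succ j ih =>
    rw [PySem.Chars.rfind.go, ih, isPrefixOf_singleton]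
    have hd : (cs.drop (j + 1))[0]? = cs[j + 1]? := by rw [List.getElem?_drop]
    rw [hd, List.take_add_one (i := j + 1), lastIdx_append]
    cases h : cs[j + 1]? with
    | none => simp [lastIdx]
    | some y =>
      have hlen : j + 1 < cs.length := by
        by_contra hc
        have hnone : cs[j + 1]? = none := List.getElem?_eq_none_iff.mpr (by omega)
        rw [hnone] at h; cases h
      have htk' : (cs.take (j + 1)).length = j + 1 := by
        rw [List.length_take]; omega
      have htk : ((cs.take (j + 1)).length : Int) = (j : Int) + 1 := by
        rw [htk']; push_cast; ring
      have h1 := neg_one_le_lastIdx ch (cs.take (j + 1))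
      simp only [Option.toList_some, lastIdx_singleton]
      by_cases hy : y = ch
      · subst hy
        rw [if_pos rfl, if_neg (show ¬(0 : Int) = -1 by omega), htk]
        rw [if_pos (by simp)]
        push_cast; ring
      · rw [if_neg hy, if_pos rfl]
        have hne : (some y == some ch) = false := by simp [hy]
        rw [hne]
        simp

theorem rfind_singleton (ch : Char) (cs : List Char) :
    PySem.Chars.rfind cs [ch] = lastIdx ch cs := by
  rw [PySem.Chars.rfind, rfind_go_singleton]
  rw [List.take_of_length_le (by omega)]

-- A's inner loop over columns computes the last 'p' of the first k characters of the row
theorem inner_loop_eq (cs : List Char) (i : Int) (k : Nat) (pr : Int × Int) :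
    (List.range k).foldl (fun pr (j : Nat) => if cs[j]? = some 'p' then (i, (j : Int)) else pr) pr
      = if lastIdx 'p' (cs.take k) = -1 then pr else (i, lastIdx 'p' (cs.take k)) := by
  induction k generalizing pr with
  | zero => simp [lastIdx]
  | succ m ih =>
    rw [List.range_succ, List.foldl_append, ih, List.take_add_one, lastIdx_append]
    cases h : cs[m]? with
    | none => simp [h, lastIdx]
    | some y =>
      have hmlt : m < cs.length := by
        by_contra hc
        have hnone : cs[m]? = none := List.getElem?_eq_none_iff.mpr (by omega)
        rw [hnone] at h; cases h
      have htk' : (cs.take m).length = m := by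
        rw [List.length_take]; omega
      have h1 := neg_one_le_lastIdx 'p' (cs.take m)
      simp only [Option.toList_some, lastIdx_singleton, h, List.foldl_cons, List.foldl_nil]
      by_cases hy : y = 'p'
      · subst hy
        norm_num [htk']
        intro hcon
        exact absurd hcon (by omega)
      · rw [if_neg (fun hcon => hy (Option.some.inj hcon)), if_neg hy, if_pos rfl]

-- proof-only: first hit, scanning a list of row indices
def revFirst (g : Nat → Int) : List Nat → Int × Int
  | [] => (0, 0)
  | i :: t => if g i = -1 then revFirst g t else ((i : Int), g i)

-- A's overwrite fold over range k equals the first hit over the reversed range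
theorem foldA_eq_revFirst (g : Nat → Int) (k : Nat) :
    (List.range k).foldl (fun pr (i : Nat) => if g i = -1 then pr else ((i : Int), g i)) ((0 : Int), (0 : Int))
      = revFirst g (List.range k).reverse := by
  induction k with
  | zero => simp [revFirst]
  | succ m ih =>
    rw [List.range_succ, List.foldl_append, List.foldl_cons, List.foldl_nil,
        List.reverse_append, List.reverse_singleton]
    simp only [List.singleton_append, revFirst]
    split_ifs with h
    · exact ih
    · rfl

-- B's row scan over cast indices is revFirst of per-row lastIdx on the first n' columns
theorem rowScan_eq_revFirst (grid : List String) (n' : Nat) (l : List Nat) :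
    pvRowScan grid (n' : Int) (l.map (fun k : Nat => (k : Int)))
      = revFirst (fun i => lastIdx 'p' ((PySem.List.pyGetD grid (i : Int) "").toList.take n')) l := by
  induction l with
  | nil => simp [pvRowScan, revFirst]
  | cons i t ih =>
    simp only [List.map_cons, pvRowScan, revFirst]
    have hj : PySem.Str.rfind (PySem.Str.slice (PySem.List.pyGetD grid (i : Int) "") none (some (n' : Int))) "p"
        = lastIdx 'p' ((PySem.List.pyGetD grid (i : Int) "").toList.take n') := by
      rw [PySem.Str.rfind_eq, PySem.Str.toList_slice, PySem.Chars.slice_eq_listSlice, PySem.List.slice_to_natCast]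
      have : ("p" : String).toList = ['p'] := rfl
      rw [this, rfind_singleton]
    rw [hj]
    have hb := neg_one_le_lastIdx 'p' ((PySem.List.pyGetD grid (i : Int) "").toList.take n')
    by_cases hc : lastIdx 'p' ((PySem.List.pyGetD grid (i : Int) "").toList.take n') = -1
    · rw [if_neg (by omega), if_pos hc, ih]
    · rw [if_pos (by omega), if_neg hc]

-- the two princess computations agree (no precondition needed: both read cells through total PySem getters)
theorem princess_eq (n : Int) (grid : List String) :
    ((PySem.List.pyRange 0 n 1).foldl (fun pr i =>
        (PySem.List.pyRange 0 n 1).foldl (fun pr j =>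
          if PySem.Str.pyGet? (PySem.List.pyGetD grid i "") j = some 'p' then (i, j) else pr) pr)
        ((0 : Int), (0 : Int)))
      = pvRowScan grid n ((PySem.List.pyRange 0 n 1).reverse) := by
  by_cases hn : 0 < n
  · obtain ⟨n', rfl⟩ : ∃ m : Nat, n = (m : Int) := ⟨n.toNat, (Int.toNat_of_nonneg (by omega)).symm⟩
    rw [PySem.List.pyRange_zero_natCast]
    set g : Nat → Int := fun i => lastIdx 'p' ((PySem.List.pyGetD grid (i : Int) "").toList.take n') with hg
    -- left side: reduce the nested fold to foldA form
    rw [List.foldl_map]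
    rw [PySem.List.foldl_congr_mem (List.range n') _
        (fun pr (i : Nat) => if g i = -1 then pr else ((i : Int), g i)) ((0 : Int), (0 : Int))
        (by
          intro acc i _
          rw [List.foldl_map]
          rw [PySem.List.foldl_congr_mem (List.range n') _
              (fun pr (j : Nat) => if (PySem.List.pyGetD grid (i : Int) "").toList[j]? = some 'p'
                then ((i : Int), (j : Int)) else pr) acc
              (by intro acc' j _; rw [PySem.Str.pyGet?_natCast])]
          rw [inner_loop_eq ((PySem.List.pyGetD grid (i : Int) "").toList) (i : Int) n' acc])]
    rw [foldA_eq_revFirst g n']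
    -- right side
    rw [← List.map_reverse, rowScan_eq_revFirst]
  · have hempty : PySem.List.pyRange 0 n 1 = [] := by
      simp [PySem.List.pyRange]; omega
    rw [hempty]
    simp [pvRowScan]

-- the 4-way cascade and the two two-way branches agree for the same princess
theorem dir_eq (p : Int × Int) (r c : Int) :
    (if r < p.1 then (some "DOWN" : Option String)
     else if p.1 < r then some "UP"
     else if c < p.2 then some "RIGHT"
     else if p.2 < c then some "LEFT"
     else none)
    = (if r ≠ p.1 then (if r < p.1 then some "DOWN" else some "UP")
       else if c ≠ p.2 then (if c < p.2 then some "RIGHT" else some "LEFT")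
       else none) := by
  split_ifs <;> first | rfl | omega

-- ===== VERDICT (by name: the statement is the Claim_ definition above) =====
theorem nextMove_spec : Claim_equal_nextMove := by
  intro n r c grid _ _
  unfold Spec_nextMove nextMove nextMove_alt
  rw [princess_eq n grid]
  exact dir_eq _ r c
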